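-- pv_equiv track=rewrite | github.com/rafael5/vehu-docker-dev | scripts/to_treemap.py | pkg_domain
-- ===== SOURCE A (Python) =====
-- _PKG_DOMAIN_MAP: list[tuple[str, str]] = sorted(
--     [
--         ("DG", "Registration/ADT"),
--         ("DPT", "Registration/ADT"),
--         ("ADT", "Registration/ADT"),
--         ("MAS", "Registration/ADT"),
--         ("PX", "Registration/ADT"),  # PCE
--         ("SD", "Scheduling"),
--         ("SC", "Scheduling"),
--         ("SDAM", "Scheduling"),
--         ("LR", "Laboratory"),
--         ("LA", "Laboratory"),
--         ("CH", "Laboratory"),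
--         ("MI", "Laboratory"),
--         ("RA", "Radiology"),
--         ("MAG", "Radiology"),
--         ("PS", "Pharmacy"),
--         ("PSS", "Pharmacy"),
--         ("PSO", "Pharmacy"),
--         ("PSJ", "Pharmacy"),
--         ("PSH", "Pharmacy"),
--         ("PSD", "Pharmacy"),
--         ("PSRX", "Pharmacy"),
--         ("PRSP", "Nutrition"),
--         ("FH", "Nutrition"),
--         ("OR", "Orders/CPRS"),
--         ("OE", "Orders/CPRS"),
--         ("GMRC", "Orders/CPRS"),
--         ("GMTS", "Orders/CPRS"),
--         ("TIU", "Orders/CPRS"),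
--         ("CPRS", "Orders/CPRS"),
--         ("YS", "Mental Health"),
--         ("GMRY", "Nursing"),
--         ("NUR", "Nursing"),
--         ("SR", "Surgery"),
--         ("IB", "Billing/Finance"),
--         ("FB", "Billing/Finance"),
--         ("DRG", "Billing/Finance"),
--         ("XU", "Kernel/System"),
--         ("XQ", "Kernel/System"),
--         ("XT", "Kernel/System"),
--         ("XWB", "Kernel/System"),
--         ("DI", "Kernel/System"),
--         ("DD", "Kernel/System"),
--         ("XTV", "Kernel/System"),
--         ("HL", "Infrastructure"),
--         ("XDR", "Infrastructure"),
--         ("VDEF", "Infrastructure"),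
--     ],
--     key=lambda x: -len(x[0]),  # longest-prefix-first
-- )
--
-- def pkg_domain(pkg_name: str | None, prefix: str | None = None) -> str:
--     """Resolve a VistA package name / prefix to a clinical domain."""
--     for candidate in [prefix, pkg_name]:
--         if not candidate:
--             continue
--         up = candidate.upper()
--         for key, domain in _PKG_DOMAIN_MAP:
--             if up.startswith(key):
--                 return domain
--     return "Other"
-- ===== SOURCE B (Python) =====
-- # Prefix tables grouped by key length: look the candidate's L-character prefix
-- # up directly in a dict, trying the longest length first.
-- _DOMAINS_BY_LEN: dict[int, dict[str, str]] = {
--     4: {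
--         "SDAM": "Scheduling",
--         "PSRX": "Pharmacy",
--         "PRSP": "Nutrition",
--         "GMRC": "Orders/CPRS",
--         "GMTS": "Orders/CPRS",
--         "CPRS": "Orders/CPRS",
--         "GMRY": "Nursing",
--         "VDEF": "Infrastructure",
--     },
--     3: {
--         "DPT": "Registration/ADT",
--         "ADT": "Registration/ADT",
--         "MAS": "Registration/ADT",
--         "MAG": "Radiology",
--         "PSS": "Pharmacy",
--         "PSO": "Pharmacy",
--         "PSJ": "Pharmacy",
--         "PSH": "Pharmacy",
--         "PSD": "Pharmacy",
--         "TIU": "Orders/CPRS",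
--         "NUR": "Nursing",
--         "DRG": "Billing/Finance",
--         "XWB": "Kernel/System",
--         "XTV": "Kernel/System",
--         "XDR": "Infrastructure",
--     },
--     2: {
--         "DG": "Registration/ADT",
--         "PX": "Registration/ADT",
--         "SD": "Scheduling",
--         "SC": "Scheduling",
--         "LR": "Laboratory",
--         "LA": "Laboratory",
--         "CH": "Laboratory",
--         "MI": "Laboratory",
--         "RA": "Radiology",
--         "PS": "Pharmacy",
--         "FH": "Nutrition",
--         "OR": "Orders/CPRS",
--         "OE": "Orders/CPRS",
--         "YS": "Mental Health",
--         "SR": "Surgery",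
--         "IB": "Billing/Finance",
--         "FB": "Billing/Finance",
--         "XU": "Kernel/System",
--         "XQ": "Kernel/System",
--         "XT": "Kernel/System",
--         "DI": "Kernel/System",
--         "DD": "Kernel/System",
--         "HL": "Infrastructure",
--     },
-- }
--
-- _MAX_LEN = 4
--
--
-- def pkg_domain(pkg_name, prefix=None):
--     """Resolve a VistA package name / prefix to a clinical domain."""
--     for candidate in (prefix, pkg_name):
--         if not candidate:
--             continue
--         up = candidate.upper()
--         for L in range(min(len(up), _MAX_LEN), 1, -1):
--             dom = _DOMAINS_BY_LEN.get(L, {}).get(up[:L])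
--             if dom is not None:
--                 return dom
--     return "Other"
-- ===== Notes on version B (the rewrite author's own statement) =====
-- stated objective: idiomatic
-- what changed: A linearly scans all 46 entries of a length-sorted table with startswith; B groups the keys into dicts by key length and looks the candidate's L-character prefix up directly, trying lengths 4 down to 2, so the per-candidate work is at most 3 dict lookups instead of up to 46 startswith tests.
import Mathlib
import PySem

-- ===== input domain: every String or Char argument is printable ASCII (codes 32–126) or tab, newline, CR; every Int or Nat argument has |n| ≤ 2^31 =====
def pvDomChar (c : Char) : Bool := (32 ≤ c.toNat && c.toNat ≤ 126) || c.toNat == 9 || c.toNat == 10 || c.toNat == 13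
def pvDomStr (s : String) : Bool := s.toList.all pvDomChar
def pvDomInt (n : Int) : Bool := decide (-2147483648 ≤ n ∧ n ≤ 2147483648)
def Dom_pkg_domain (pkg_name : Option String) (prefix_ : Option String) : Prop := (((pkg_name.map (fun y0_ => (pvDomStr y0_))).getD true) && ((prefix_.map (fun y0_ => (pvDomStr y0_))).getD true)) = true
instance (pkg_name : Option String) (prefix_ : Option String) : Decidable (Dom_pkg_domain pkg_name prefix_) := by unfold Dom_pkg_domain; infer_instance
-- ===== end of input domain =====

-- B replaces A's linear startswith-scan of the sorted prefix table by direct dict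
-- lookups of the candidate's L-character prefix, longest length first (objective: idiomatic).

-- ===== PORT A =====
-- the raw table, in source order
def pvRawMap : List (String × String) :=
  [("DG", "Registration/ADT"), ("DPT", "Registration/ADT"), ("ADT", "Registration/ADT"),
   ("MAS", "Registration/ADT"), ("PX", "Registration/ADT"),
   ("SD", "Scheduling"), ("SC", "Scheduling"), ("SDAM", "Scheduling"),
   ("LR", "Laboratory"), ("LA", "Laboratory"), ("CH", "Laboratory"), ("MI", "Laboratory"),
   ("RA", "Radiology"), ("MAG", "Radiology"),
   ("PS", "Pharmacy"), ("PSS", "Pharmacy"), ("PSO", "Pharmacy"), ("PSJ", "Pharmacy"),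
   ("PSH", "Pharmacy"), ("PSD", "Pharmacy"), ("PSRX", "Pharmacy"),
   ("PRSP", "Nutrition"), ("FH", "Nutrition"),
   ("OR", "Orders/CPRS"), ("OE", "Orders/CPRS"), ("GMRC", "Orders/CPRS"),
   ("GMTS", "Orders/CPRS"), ("TIU", "Orders/CPRS"), ("CPRS", "Orders/CPRS"),
   ("YS", "Mental Health"),
   ("GMRY", "Nursing"), ("NUR", "Nursing"),
   ("SR", "Surgery"),
   ("IB", "Billing/Finance"), ("FB", "Billing/Finance"), ("DRG", "Billing/Finance"),
   ("XU", "Kernel/System"), ("XQ", "Kernel/System"), ("XT", "Kernel/System"),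
   ("XWB", "Kernel/System"), ("DI", "Kernel/System"), ("DD", "Kernel/System"),
   ("XTV", "Kernel/System"),
   ("HL", "Infrastructure"), ("XDR", "Infrastructure"), ("VDEF", "Infrastructure")]

-- _PKG_DOMAIN_MAP = sorted(raw, key=lambda x: -len(x[0]))
def pvPkgDomainMap : List (String × String) :=
  PySem.List.sorted pvRawMap (fun x => -(PySem.Str.len x.1)) false

-- 'for key, domain in _PKG_DOMAIN_MAP: if up.startswith(key): return domain'
def pvScanMap : List (String × String) → String → Option String
  | [], _ => none
  | (k, d) :: rest, up => if PySem.Str.startswith up k then some d else pvScanMap rest up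

-- one iteration of 'for candidate in [prefix, pkg_name]'
def pvTryA (c : Option String) : Option String :=
  match c with
  | none => none
  | some s => if s = "" then none else pvScanMap pvPkgDomainMap (PySem.Str.upper s)

def pkg_domain (pkg_name : Option String) (prefix_ : Option String) : String :=
  match pvTryA prefix_ with
  | some d => d
  | none =>
    match pvTryA pkg_name with
    | some d => d
    | none => "Other"

-- ===== PORT B =====
def pvG4 : List (String × String) :=
  [("SDAM", "Scheduling"), ("PSRX", "Pharmacy"), ("PRSP", "Nutrition"),
   ("GMRC", "Orders/CPRS"), ("GMTS", "Orders/CPRS"), ("CPRS", "Orders/CPRS"),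
   ("GMRY", "Nursing"), ("VDEF", "Infrastructure")]

def pvG3 : List (String × String) :=
  [("DPT", "Registration/ADT"), ("ADT", "Registration/ADT"), ("MAS", "Registration/ADT"),
   ("MAG", "Radiology"), ("PSS", "Pharmacy"), ("PSO", "Pharmacy"), ("PSJ", "Pharmacy"),
   ("PSH", "Pharmacy"), ("PSD", "Pharmacy"), ("TIU", "Orders/CPRS"), ("NUR", "Nursing"),
   ("DRG", "Billing/Finance"), ("XWB", "Kernel/System"), ("XTV", "Kernel/System"),
   ("XDR", "Infrastructure")]

def pvG2 : List (String × String) :=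
  [("DG", "Registration/ADT"), ("PX", "Registration/ADT"), ("SD", "Scheduling"),
   ("SC", "Scheduling"), ("LR", "Laboratory"), ("LA", "Laboratory"), ("CH", "Laboratory"),
   ("MI", "Laboratory"), ("RA", "Radiology"), ("PS", "Pharmacy"), ("FH", "Nutrition"),
   ("OR", "Orders/CPRS"), ("OE", "Orders/CPRS"), ("YS", "Mental Health"), ("SR", "Surgery"),
   ("IB", "Billing/Finance"), ("FB", "Billing/Finance"), ("XU", "Kernel/System"),
   ("XQ", "Kernel/System"), ("XT", "Kernel/System"), ("DI", "Kernel/System"),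
   ("DD", "Kernel/System"), ("HL", "Infrastructure")]

-- _DOMAINS_BY_LEN = {4: {...}, 3: {...}, 2: {...}}
def pvByLen : PySem.Dict Int (PySem.Dict String String) :=
  PySem.Dict.mk [((4 : Int), PySem.Dict.mk pvG4), ((3 : Int), PySem.Dict.mk pvG3),
                 ((2 : Int), PySem.Dict.mk pvG2)]

-- 'for L in range(min(len(up), _MAX_LEN), 1, -1): dom = _DOMAINS_BY_LEN.get(L, {}).get(up[:L]); if dom is not None: return dom'
def pvTryLevels : List Int → String → Option String
  | [], _ => none
  | L :: rest, up =>
    match (pvByLen.getD L PySem.Dict.empty).get? (PySem.Str.slice up none (some L)) with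
    | some dom => some dom
    | none => pvTryLevels rest up

def pvTryB (c : Option String) : Option String :=
  match c with
  | none => none
  | some s =>
    if s = "" then none
    else
      let up := PySem.Str.upper s
      pvTryLevels (PySem.List.pyRange (min (PySem.Str.len up) 4) 1 (-1)) up

def pkg_domain_alt (pkg_name : Option String) (prefix_ : Option String) : String :=
  match pvTryB prefix_ with
  | some d => d
  | none =>
    match pvTryB pkg_name with
    | some d => d
    | none => "Other"

-- ===== PRECONDITION & SPEC =====
def Spec_pkg_domain (pkg_name : Option String) (prefix_ : Option String) (out : String) : Prop := out = pkg_domain_alt pkg_name prefix_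
instance (pkg_name : Option String) (prefix_ : Option String) (out : String) : Decidable (Spec_pkg_domain pkg_name prefix_ out) := by unfold Spec_pkg_domain; infer_instance

-- ===== CLAIM (what is proved, stated in full; the proofs are below) =====
def Claim_equal_pkg_domain : Prop := ∀ (pkg_name : Option String) (prefix_ : Option String), Dom_pkg_domain pkg_name prefix_ → Spec_pkg_domain pkg_name prefix_ (pkg_domain pkg_name prefix_)

-- ===== LEMMAS AND PROOFS =====

-- the stable sort groups keys by descending length, keeping source order inside a group
theorem pvSorted_literal : pvPkgDomainMap = pvG4 ++ pvG3 ++ pvG2 := by decide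

theorem pvScan_append (xs ys : List (String × String)) (up : String) :
    pvScanMap (xs ++ ys) up =
      match pvScanMap xs up with
      | some d => some d
      | none => pvScanMap ys up := by
  induction xs with
  | nil => simp [pvScanMap]
  | cons p rest ih =>
    obtain ⟨k, d⟩ := p
    by_cases h : PySem.Chars.startswith up.toList k.toList = true <;>
      simp [pvScanMap, PySem.Str.startswith_eq, h, ih]

theorem pvStartswith_iff (up k : String) (L : Nat) (hk : k.toList.length = L)
    (_hL : L ≤ up.toList.length) :
    (PySem.Str.startswith up k = true) ↔ k = PySem.Str.slice up none (some (L : Int)) := by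
  rw [PySem.Str.startswith_eq, PySem.Chars.startswith_iff, List.prefix_iff_eq_take, hk]
  constructor
  · intro h
    apply String.toList_injective  -- strings are equal iff their char lists are
    rw [PySem.Str.toList_slice, PySem.Chars.slice_eq_listSlice,
        PySem.List.slice_to _ (by omega)]
    simpa using h
  · intro h
    have := congrArg String.toList h
    rw [PySem.Str.toList_slice, PySem.Chars.slice_eq_listSlice,
        PySem.List.slice_to _ (by omega)] at this
    simpa using this

theorem pvScan_eq_get (kds : List (String × String)) (up : String) (L : Nat)
    (hk : ∀ p ∈ kds, p.1.toList.length = L) (hL : L ≤ up.toList.length) :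
    pvScanMap kds up = (PySem.Dict.mk kds).get? (PySem.Str.slice up none (some (L : Int))) := by
  induction kds with
  | nil => simp [pvScanMap, PySem.Dict.get?]
  | cons p rest ih =>
    obtain ⟨k, d⟩ := p
    have hkL : k.toList.length = L := hk (k, d) (by simp)
    rw [pvScanMap, PySem.Dict.get?_mk_cons]
    by_cases h : PySem.Str.startswith up k = true
    · have heq : k = PySem.Str.slice up none (some (L : Int)) :=
        (pvStartswith_iff up k L hkL hL).mp h
      have hbeq : (k == PySem.Str.slice up none (some (L : Int))) = true := by
        simpa using heq
      rw [if_pos h, if_pos hbeq]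
    · have hne : k ≠ PySem.Str.slice up none (some (L : Int)) := by
        intro he; exact h ((pvStartswith_iff up k L hkL hL).mpr he)
      have hbeq : (k == PySem.Str.slice up none (some (L : Int))) = true → False := by
        intro hb; exact hne (by simpa using hb)
      rw [if_neg h, if_neg hbeq]
      exact ih (fun p hp => hk p (by simp [hp]))

theorem pvScan_none_short (kds : List (String × String)) (up : String) (L : Nat)
    (hk : ∀ p ∈ kds, p.1.toList.length = L) (h : up.toList.length < L) :
    pvScanMap kds up = none := by
  induction kds with
  | nil => rfl
  | cons p rest ih =>
    obtain ⟨k, d⟩ := p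
    have hkL : k.toList.length = L := hk (k, d) (by simp)
    have hsw : PySem.Str.startswith up k = true → False := by
      intro hc
      have hpre := (PySem.Chars.startswith_iff _ _).mp (by
        rw [PySem.Str.startswith_eq] at hc; exact hc)
      have := hpre.length_le
      omega
    rw [pvScanMap, if_neg hsw]
    exact ih (fun p hp => hk p (by simp [hp]))

theorem pvMain (up : String) :
    pvScanMap pvPkgDomainMap up =
      pvTryLevels (PySem.List.pyRange (min (PySem.Str.len up) 4) 1 (-1)) up := by
  have hk4 : ∀ p ∈ pvG4, p.1.toList.length = 4 := by decide
  have hk3 : ∀ p ∈ pvG3, p.1.toList.length = 3 := by decide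
  have hk2 : ∀ p ∈ pvG2, p.1.toList.length = 2 := by decide
  have hlen : PySem.Str.len up = (up.toList.length : Int) := by
    simp [PySem.Str.len_eq]
  rw [pvSorted_literal, pvScan_append, pvScan_append]
  set n := up.toList.length with hn
  by_cases h4 : 4 ≤ n
  · have hmin : min (PySem.Str.len up) 4 = 4 := by rw [hlen]; omega
    have hr : PySem.List.pyRange 4 1 (-1) = [4, 3, 2] := by decide
    rw [hmin, hr]
    rw [pvScan_eq_get pvG4 up 4 hk4 (by omega), pvScan_eq_get pvG3 up 3 hk3 (by omega),
        pvScan_eq_get pvG2 up 2 hk2 (by omega)]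
    show _ = pvTryLevels [4, 3, 2] up
    simp only [pvTryLevels]
    have e4 : pvByLen.getD (4 : Int) PySem.Dict.empty = PySem.Dict.mk pvG4 := by decide
    have e3 : pvByLen.getD (3 : Int) PySem.Dict.empty = PySem.Dict.mk pvG3 := by decide
    have e2 : pvByLen.getD (2 : Int) PySem.Dict.empty = PySem.Dict.mk pvG2 := by decide
    rw [e4, e3, e2]
    cases (PySem.Dict.mk pvG4).get? (PySem.Str.slice up none (some 4)) <;>
      cases (PySem.Dict.mk pvG3).get? (PySem.Str.slice up none (some 3)) <;>
      cases (PySem.Dict.mk pvG2).get? (PySem.Str.slice up none (some 2)) <;> rfl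
  · by_cases h3 : n = 3
    · have hmin : min (PySem.Str.len up) 4 = 3 := by rw [hlen]; omega
      have hr : PySem.List.pyRange 3 1 (-1) = [3, 2] := by decide
      rw [hmin, hr]
      rw [pvScan_none_short pvG4 up 4 hk4 (by omega),
          pvScan_eq_get pvG3 up 3 hk3 (by omega), pvScan_eq_get pvG2 up 2 hk2 (by omega)]
      show _ = pvTryLevels [3, 2] up
      simp only [pvTryLevels]
      have e3 : pvByLen.getD (3 : Int) PySem.Dict.empty = PySem.Dict.mk pvG3 := by decide
      have e2 : pvByLen.getD (2 : Int) PySem.Dict.empty = PySem.Dict.mk pvG2 := by decide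
      rw [e3, e2]
      cases (PySem.Dict.mk pvG3).get? (PySem.Str.slice up none (some 3)) <;>
        cases (PySem.Dict.mk pvG2).get? (PySem.Str.slice up none (some 2)) <;> rfl
    · by_cases h2 : n = 2
      · have hmin : min (PySem.Str.len up) 4 = 2 := by rw [hlen]; omega
        have hr : PySem.List.pyRange 2 1 (-1) = [2] := by decide
        rw [hmin, hr]
        rw [pvScan_none_short pvG4 up 4 hk4 (by omega),
            pvScan_none_short pvG3 up 3 hk3 (by omega),
            pvScan_eq_get pvG2 up 2 hk2 (by omega)]
        show _ = pvTryLevels [2] up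
        simp only [pvTryLevels]
        have e2 : pvByLen.getD (2 : Int) PySem.Dict.empty = PySem.Dict.mk pvG2 := by decide
        rw [e2]
        cases (PySem.Dict.mk pvG2).get? (PySem.Str.slice up none (some 2)) <;> rfl
      · -- n ≤ 1 : no level to try on either side
        have hn1 : n ≤ 1 := by omega
        have hr : PySem.List.pyRange (min (PySem.Str.len up) 4) 1 (-1) = [] := by
          apply PySem.List.pyRange_neg_one_eq_nil
          rw [hlen]; omega
        rw [hr]
        rw [pvScan_none_short pvG4 up 4 hk4 (by omega),
            pvScan_none_short pvG3 up 3 hk3 (by omega),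
            pvScan_none_short pvG2 up 2 hk2 (by omega)]
        rfl

theorem pvTry_eq (c : Option String) : pvTryA c = pvTryB c := by
  cases c with
  | none => rfl
  | some s =>
    by_cases h : s = ""
    · simp [pvTryA, pvTryB, h]
    · simp only [pvTryA, pvTryB, h, if_false]
      exact pvMain (PySem.Str.upper s)

-- ===== VERDICT (by name: the statement is the Claim_ definition above) =====
theorem pkg_domain_spec : Claim_equal_pkg_domain := by
  intro pkg_name prefix_ _
  unfold Spec_pkg_domain pkg_domain pkg_domain_alt
  rw [pvTry_eq prefix_, pvTry_eq pkg_name]
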